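-- pv_equiv track=rewrite | github.com/Michal-Nithesh/365-days-of-code-2024 | Day-298/AmazingSubarray.py | solve
-- ===== SOURCE A (Python) =====
-- def solve(A):
--     n=len(A)
--     v=["A","E","i","O","U","a","e","I","o","u"]
--     count=0
--     for i in range(len(A)):
--         if A[i] in v:
--             count+=(n-i)
--     return count%10003
-- ===== SOURCE B (Python) =====
-- def solve(A):
--     vowels = set("AEIOUaeiou")
--     vc = 0
--     total = 0
--     for ch in A:
--         if ch in vowels:
--             vc += 1
--         total += vc
--     return total % 10003
-- ===== Notes on version B (the rewrite author's own statement) =====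
-- stated objective: alternative
-- what changed: Instead of adding (n-i) at each vowel index found via range/indexing, B makes one pass over the characters keeping a running count of vowel starts seen so far and adds that count at every position; mod 10003 taken once at the end.
import Mathlib
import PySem

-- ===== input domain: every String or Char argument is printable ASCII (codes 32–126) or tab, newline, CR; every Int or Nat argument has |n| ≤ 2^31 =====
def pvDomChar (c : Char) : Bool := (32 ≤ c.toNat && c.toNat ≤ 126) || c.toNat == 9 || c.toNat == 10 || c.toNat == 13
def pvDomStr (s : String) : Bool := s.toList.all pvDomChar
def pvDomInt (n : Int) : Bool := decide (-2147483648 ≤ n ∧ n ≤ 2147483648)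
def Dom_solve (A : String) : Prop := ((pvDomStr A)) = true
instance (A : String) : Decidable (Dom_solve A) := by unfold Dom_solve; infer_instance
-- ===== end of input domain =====

-- B replaces A's "per vowel index add (n-i)" loop by a single pass keeping a running
-- count of vowel starts seen so far and adding it at every position (objective: alternative).

-- ===== PORT A =====
-- A indexes the string by i over range(len(A)); i is always in range, so A[i] is pyGetD.
def solve (A : String) : Int :=
  let n : Int := PySem.Str.len A
  let v : List Char := ['A', 'E', 'i', 'O', 'U', 'a', 'e', 'I', 'o', 'u']
  let count : Int := (PySem.List.pyRange 0 n 1).foldl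
    (fun count i =>
      if v.contains (PySem.List.pyGetD A.toList i ' ') then count + (n - i) else count) 0
  PySem.Int.mod count 10003

-- ===== PORT B =====
def solve_alt (A : String) : Int :=
  let vowels : PySem.Set Char := PySem.Set.ofList "AEIOUaeiou".toList
  let st : Int × Int := A.toList.foldl
    (fun (s : Int × Int) ch =>
      let vc := if PySem.Set.contains vowels ch then s.1 + 1 else s.1
      (vc, s.2 + vc)) (0, 0)
  PySem.Int.mod st.2 10003

-- ===== PRECONDITION & SPEC =====
def Spec_solve (A : String) (out : Int) : Prop := out = solve_alt A
instance (A : String) (out : Int) : Decidable (Spec_solve A out) := by unfold Spec_solve; infer_instance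

-- ===== CLAIM (what is proved, stated in full; the proofs are below) =====
def Claim_equal_solve : Prop := ∀ (A : String), Dom_solve A → Spec_solve A (solve A)

-- ===== LEMMAS AND PROOFS =====

-- reference count: a vowel at a position contributes 1 + (length of the tail after it)
def pvF (cs : List Char) : Int :=
  match cs with
  | [] => 0
  | c :: t => (if (['A', 'E', 'i', 'O', 'U', 'a', 'e', 'I', 'o', 'u'] : List Char).contains c
               then 1 + (t.length : Int) else 0) + pvF t

-- B's vowel set and A's vowel list test the same characters
lemma pv_vow_eq (c : Char) :
    PySem.Set.contains (PySem.Set.ofList "AEIOUaeiou".toList) c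
      = (['A', 'E', 'i', 'O', 'U', 'a', 'e', 'I', 'o', 'u'] : List Char).contains c := by
  have h : PySem.Set.ofList "AEIOUaeiou".toList
      = ['A', 'E', 'I', 'O', 'U', 'a', 'e', 'i', 'o', 'u'] := by decide
  rw [h]
  simp only [PySem.Set.contains, List.contains_cons, List.contains_nil, Bool.or_false]
  cases h1 : c == 'A' <;> cases h2 : c == 'E' <;> cases h3 : c == 'I' <;> cases h4 : c == 'O' <;>
    cases h5 : c == 'U' <;> cases h6 : c == 'a' <;> cases h7 : c == 'e' <;> cases h8 : c == 'i' <;>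
    cases h9 : c == 'o' <;> cases h10 : c == 'u' <;> simp

-- A's indexed loop over the suffix of xs after pre accumulates pvF of that suffix
lemma pv_lemA (suf : List Char) : ∀ (pre xs : List Char) (n acc : Int),
    xs = pre ++ suf → n = (xs.length : Int) →
    (PySem.List.pyRange (pre.length : Int) n 1).foldl
      (fun count i =>
        if (['A', 'E', 'i', 'O', 'U', 'a', 'e', 'I', 'o', 'u'] : List Char).contains
             (PySem.List.pyGetD xs i ' ')
        then count + (n - i) else count) acc
    = acc + pvF suf := by
  induction suf with
  | nil =>
    intro pre xs n acc hxs hn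
    subst hxs hn
    simp [pvF, PySem.List.pyRange_one_eq_nil]
  | cons c tl ih =>
    intro pre xs n acc hxs hn
    have hlen : n = (pre.length : Int) + 1 + (tl.length : Int) := by
      subst hxs; rw [hn]; simp; ring
    have hlt : (pre.length : Int) < n := by omega
    rw [PySem.List.pyRange_one_cons hlt, List.foldl_cons]
    have hget : PySem.List.pyGetD xs (pre.length : Int) ' ' = c := by
      subst hxs
      simp [PySem.List.pyGetD_natCast, List.getD_eq_getElem?_getD]
    rw [hget]
    have key := ih (pre ++ [c]) xs n
      (if (['A', 'E', 'i', 'O', 'U', 'a', 'e', 'I', 'o', 'u'] : List Char).contains c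
       then acc + (n - (pre.length : Int)) else acc)
      (by rw [hxs]; simp) hn
    rw [show (((pre ++ [c]).length : Nat) : Int) = (pre.length : Int) + 1 by simp] at key
    rw [key]
    have harith : n - (pre.length : Int) = 1 + (tl.length : Int) := by omega
    rw [harith]
    simp only [pvF]
    split <;> ring

-- B's running-count pass computes starting total + vc·len + pvF
lemma pv_lemB (cs : List Char) : ∀ (vc t : Int),
    (cs.foldl (fun (s : Int × Int) ch =>
        let vc := if (['A', 'E', 'i', 'O', 'U', 'a', 'e', 'I', 'o', 'u'] : List Char).contains ch
                  then s.1 + 1 else s.1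
        (vc, s.2 + vc)) (vc, t)).2
    = t + vc * (cs.length : Int) + pvF cs := by
  induction cs with
  | nil => intro vc t; simp [pvF]
  | cons c tl ih =>
    intro vc t
    by_cases hc : (['A', 'E', 'i', 'O', 'U', 'a', 'e', 'I', 'o', 'u'] : List Char).contains c
    all_goals simp only [List.foldl_cons, pvF, List.length_cons, hc, if_true, if_neg,
      Bool.not_eq_true] at *
    · rw [ih]; push_cast; ring
    · rw [ih]; push_cast; ring

-- ===== VERDICT (by name: the statement is the Claim_ definition above) =====
theorem solve_spec : Claim_equal_solve := by
  intro A _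
  unfold Spec_solve solve solve_alt
  have hcg := PySem.List.foldl_congr_mem
    (l := A.toList) (init := ((0 : Int), (0 : Int)))
    (f := fun (s : Int × Int) ch =>
      let vc := if PySem.Set.contains (PySem.Set.ofList "AEIOUaeiou".toList) ch then s.1 + 1 else s.1
      (vc, s.2 + vc))
    (g := fun (s : Int × Int) ch =>
      let vc := if (['A', 'E', 'i', 'O', 'U', 'a', 'e', 'I', 'o', 'u'] : List Char).contains ch
                then s.1 + 1 else s.1
      (vc, s.2 + vc))
    (by intro acc x _; simp only [pv_vow_eq])
  have hA := pv_lemA A.toList [] A.toList ((A.toList.length : Nat) : Int) 0 (by simp) rfl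
  simp only [List.length_nil, Nat.cast_zero] at hA
  have hB := pv_lemB A.toList 0 0
  simp only [zero_mul, zero_add] at hB
  simp only [PySem.Str.len_eq]
  rw [hA, hcg, hB]; ring_nf
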